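-- pv_equiv track=rewrite | github.com/nathansnellaert/bureau-labor-statistics | src/transforms/series_data/main.py | get_constant_values
-- ===== SOURCE A (Python) =====
-- ALL_DIMENSIONS = [
--     "date",
--     "seasonality",
--     "area",
--     "area_type",
--     "industry",
--     "occupation",
--     "demographic_age",
--     "demographic_gender",
--     "demographic_race",
--     "demographic_education",
--     "unit",
-- ]
--
-- def get_constant_values(records: list[dict]) -> dict:
--     """Get constant dimension values for metadata."""
--     constants = {}
--     for col in ALL_DIMENSIONS:
--         if col == "date":
--             continue
--         values = set()
--         for r in records:
--             v = r.get(col, "")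
--             if v and v != "":
--                 values.add(v)
--         if len(values) == 1:
--             constants[col] = list(values)[0]
--     return constants
-- ===== SOURCE B (Python) =====
-- ALL_DIMENSIONS = [
--     "date",
--     "seasonality",
--     "area",
--     "area_type",
--     "industry",
--     "occupation",
--     "demographic_age",
--     "demographic_gender",
--     "demographic_race",
--     "demographic_education",
--     "unit",
-- ]
--
-- def get_constant_values(records: list[dict]) -> dict:
--     """Get constant dimension values for metadata (single pass over records)."""
--     # state maps a dimension to its first qualifying value, or None once two differ
--     state = {}
--     for r in records:
--         for col in ALL_DIMENSIONS[1:]: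
--             v = r.get(col, "")
--             if v and v != "":
--                 if col not in state:
--                     state[col] = v
--                 elif state[col] is not None and state[col] != v:
--                     state[col] = None
--     return {col: state[col] for col in ALL_DIMENSIONS[1:] if col in state and state[col] is not None}
-- ===== Notes on version B (the rewrite author's own statement) =====
-- stated objective: alternative
-- what changed: A rescans the whole record list once per dimension, building a set of values for each; B makes a single pass over the records, keeping for each dimension a running first-value-or-MULTIPLE-sentinel state, then reads the constants off that state.
import Mathlib
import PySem

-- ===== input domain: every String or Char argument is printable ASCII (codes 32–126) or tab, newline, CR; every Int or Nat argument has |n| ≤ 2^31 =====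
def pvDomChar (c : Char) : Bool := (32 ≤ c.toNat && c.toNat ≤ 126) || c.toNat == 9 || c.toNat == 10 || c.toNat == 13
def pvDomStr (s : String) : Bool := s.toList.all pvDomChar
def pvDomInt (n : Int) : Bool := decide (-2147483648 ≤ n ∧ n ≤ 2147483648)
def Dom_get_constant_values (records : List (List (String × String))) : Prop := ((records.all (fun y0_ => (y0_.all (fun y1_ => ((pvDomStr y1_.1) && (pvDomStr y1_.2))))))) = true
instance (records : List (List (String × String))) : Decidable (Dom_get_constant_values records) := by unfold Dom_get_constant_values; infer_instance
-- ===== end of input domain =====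

-- B replaces A's per-dimension rescans of the records by one pass keeping a value-or-sentinel state per dimension; same return value (alternative decomposition, no speed claim).

-- ===== PORT A =====
def ALL_DIMENSIONS : List String :=
  ["date", "seasonality", "area", "area_type", "industry", "occupation",
   "demographic_age", "demographic_gender", "demographic_race",
   "demographic_education", "unit"]

-- r.get(col, "") on a record (a Python dict: first-match lookup)
def recGet (r : List (String × String)) (col : String) : String :=
  PySem.Dict.getD (PySem.Dict.mk r) col ""

def get_constant_values (records : List (List (String × String))) : List (String × String) :=
  (ALL_DIMENSIONS.foldl (fun (constants : PySem.Dict String String) col =>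
    if col == "date" then constants
    else
      let values : PySem.Set String :=
        records.foldl (fun values r =>
          let v := recGet r col
          if v ≠ "" then PySem.Set.add values v else values) PySem.Set.empty
      -- list(values)[0]: taken only when the set has exactly one element, so hash order is irrelevant
      if PySem.Set.len values == 1 then constants.insert col values.headI else constants)
    PySem.Dict.empty).items

-- ===== PORT B =====
-- one record-step for one column of B's state (value `some v`, sentinel None = `none`)
def bStep (state : PySem.Dict String (Option String)) (r : List (String × String))
    (col : String) : PySem.Dict String (Option String) :=
  let v := recGet r col
  if v ≠ "" then
    match state.get? col with
    | none => state.insert col (some v)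
    | some (some w) => if w ≠ v then state.insert col none else state
    | some none => state
  else state

def get_constant_values_alt (records : List (List (String × String))) : List (String × String) :=
  let state := records.foldl
    (fun st r => (ALL_DIMENSIONS.drop 1).foldl (fun st col => bStep st r col) st)
    PySem.Dict.empty
  ((ALL_DIMENSIONS.drop 1).foldl (fun (constants : PySem.Dict String String) col =>
    match state.get? col with
    | some (some v) => constants.insert col v
    | _ => constants) PySem.Dict.empty).items

-- ===== PRECONDITION & SPEC =====
def Spec_get_constant_values (records : List (List (String × String))) (out : List (String × String)) : Prop := out = get_constant_values_alt records
instance (records : List (List (String × String))) (out : List (String × String)) : Decidable (Spec_get_constant_values records out) := by unfold Spec_get_constant_values; infer_instance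

-- ===== CLAIM (what is proved, stated in full; the proofs are below) =====
def Claim_equal_get_constant_values : Prop := ∀ (records : List (List (String × String))), Dom_get_constant_values records → Spec_get_constant_values records (get_constant_values records)

-- ===== LEMMAS AND PROOFS =====

-- the qualifying values of a column, in record order
def qualsOf (records : List (List (String × String))) (col : String) : List String :=
  (records.map (fun r => recGet r col)).filter (fun v => !(v == ""))

-- B's per-column transition on qualifying values
def sstep (e : Option (Option String)) (v : String) : Option (Option String) :=
  match e with
  | none => some (some v)
  | some (some w) => if w ≠ v then some none else e
  | some none => e

theorem qualsOf_cons (r : List (String × String)) (recs : List (List (String × String))) (col : String) :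
    qualsOf (r :: recs) col =
      (if recGet r col ≠ "" then [recGet r col] else []) ++ qualsOf recs col := by
  simp [qualsOf]
  by_cases h : recGet r col = "" <;> simp [h]

-- A's inner loop is Set.update with the qualifying values
theorem aInner_eq (col : String) :
    ∀ (recs : List (List (String × String))) (s : PySem.Set String),
      recs.foldl (fun values r =>
        let v := recGet r col
        if v ≠ "" then PySem.Set.add values v else values) s
      = PySem.Set.update s (qualsOf recs col) := by
  intro recs
  induction recs with
  | nil => intro s; rfl
  | cons r recs ih =>
    intro s
    rw [List.foldl_cons, ih, qualsOf_cons]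
    by_cases h : recGet r col = ""
    · simp [h]
    · simp [h, PySem.Set.update_append, PySem.Set.update_cons]

theorem mem_update_left {s : PySem.Set String} {l : List String} {x : String}
    (h : x ∈ s) : x ∈ PySem.Set.update s l := (PySem.Set.mem_update _ _ _).2 (Or.inl h)

theorem mem_update_right {s : PySem.Set String} {l : List String} {x : String}
    (h : x ∈ l) : x ∈ PySem.Set.update s l := (PySem.Set.mem_update _ _ _).2 (Or.inr h)

-- if every element of l equals v, updating {v} with l changes nothing
theorem update_singleton_all_eq (v : String) :
    ∀ (l : List String), (∀ w ∈ l, w = v) → PySem.Set.update [v] l = [v] := by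
  intro l
  induction l with
  | nil => intro _; rfl
  | cons w l ih =>
    intro h
    have hw : w = v := h w (by simp)
    subst hw
    rw [PySem.Set.update_cons, PySem.Set.add_of_mem (by simp)]
    exact ih (fun u hu => h u (by simp [hu]))

-- the sentinel is absorbing
theorem foldl_sstep_sentinel : ∀ (l : List String), l.foldl sstep (some none) = some none := by
  intro l; induction l with
  | nil => rfl
  | cons w l ih => simpa [List.foldl, sstep] using ih

theorem foldl_sstep_some (v : String) :
    ∀ (l : List String), l.foldl sstep (some (some v)) =
      if l.all (fun w => w == v) then some (some v) else some none := by
  intro l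
  induction l with
  | nil => rfl
  | cons w l ih =>
    by_cases h : w = v
    · simp [List.foldl, sstep, h, ih]
    · simp [List.foldl, sstep, h, Ne.symm h, foldl_sstep_sentinel]

-- B's single step only touches the key it processes
theorem bStep_get?_ne (st : PySem.Dict String (Option String)) (r : List (String × String))
    (c col : String) (h : col ≠ c) : (bStep st r c).get? col = st.get? col := by
  unfold bStep
  by_cases hv : recGet r c = ""
  · simp [hv]
  · cases hc : st.get? c with
    | none => simp [hv, hc, PySem.Dict.get?_insert, h]
    | some e =>
      cases e with
      | none => simp [hv, hc]
      | some w =>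
        by_cases hw : w = recGet r c <;>
          simp [hv, hc, hw, PySem.Dict.get?_insert, h]

theorem bStep_get?_self (st : PySem.Dict String (Option String)) (r : List (String × String))
    (col : String) :
    (bStep st r col).get? col =
      if recGet r col ≠ "" then sstep (st.get? col) (recGet r col) else st.get? col := by
  unfold bStep
  by_cases hv : recGet r col = ""
  · simp [hv]
  · cases hc : st.get? col with
    | none => simp [hv, hc, sstep, PySem.Dict.get?_insert]
    | some e =>
      cases e with
      | none => simp [hv, hc, sstep]
      | some w =>
        by_cases hw : w = recGet r col <;>
          simp [hv, hc, hw, sstep, PySem.Dict.get?_insert]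

-- B's inner loop over a duplicate-free column list, seen through one key
theorem bInner_get? (r : List (String × String)) (col : String) :
    ∀ (cs : List String), cs.Nodup → ∀ (st : PySem.Dict String (Option String)),
      (cs.foldl (fun st c => bStep st r c) st).get? col =
        if col ∈ cs then
          (if recGet r col ≠ "" then sstep (st.get? col) (recGet r col) else st.get? col)
        else st.get? col := by
  intro cs
  induction cs with
  | nil => intro _ st; simp
  | cons c cs ih =>
    intro hnd st
    have hnd' : cs.Nodup := hnd.of_cons
    by_cases hc : col = c
    · subst hc
      have hnot : col ∉ cs := by
        intro hmem; exact (List.nodup_cons.1 hnd).1 hmem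
      simp [List.foldl, ih hnd', hnot, bStep_get?_self]
    · simp [List.foldl, ih hnd', bStep_get?_ne st r c col hc, hc]

-- B's outer pass, seen through one processed key, is a fold of sstep over the qualifying values
theorem bOuter_get? (col : String) (hcol : col ∈ ALL_DIMENSIONS.drop 1) :
    ∀ (recs : List (List (String × String))) (st : PySem.Dict String (Option String)),
      (recs.foldl
        (fun st r => (ALL_DIMENSIONS.drop 1).foldl (fun st c => bStep st r c) st) st).get? col
      = (qualsOf recs col).foldl sstep (st.get? col) := by
  have hnd : (ALL_DIMENSIONS.drop 1).Nodup := by decide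
  intro recs
  induction recs with
  | nil => intro st; rfl
  | cons r recs ih =>
    intro st
    rw [List.foldl_cons, ih, bInner_get? r col _ hnd, qualsOf_cons]
    have hcol' : col ∈ ALL_DIMENSIONS.tail := by simpa [List.drop_one] using hcol
    by_cases hv : recGet r col = "" <;> simp [hv, hcol, hcol']

-- per-column agreement of the two emit decisions
theorem emit_eq (records : List (List (String × String))) (col : String)
    (hcol : col ∈ ALL_DIMENSIONS.drop 1) (d : PySem.Dict String String) :
    (let values : PySem.Set String :=
        records.foldl (fun values r =>
          let v := recGet r col
          if v ≠ "" then PySem.Set.add values v else values) PySem.Set.empty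
     if PySem.Set.len values == 1 then d.insert col values.headI else d)
    = (match (records.foldl
        (fun st r => (ALL_DIMENSIONS.drop 1).foldl (fun st c => bStep st r c) st)
        PySem.Dict.empty).get? col with
      | some (some v) => d.insert col v
      | _ => d) := by
  rw [bOuter_get? col hcol records PySem.Dict.empty]
  rw [aInner_eq col records PySem.Set.empty]
  have hget : PySem.Dict.get? (PySem.Dict.empty) col = (none : Option (Option String)) := rfl
  rw [hget]
  cases hq : qualsOf records col with
  | nil => simp [PySem.Set.len]
  | cons v l =>
    have hupd : PySem.Set.update PySem.Set.empty (v :: l) =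
        PySem.Set.update [v] l := by
      rw [PySem.Set.update_cons]; rfl
    rw [hupd]
    have hfold : (v :: l).foldl sstep (none : Option (Option String)) =
        if l.all (fun w => w == v) then some (some v) else some none := by
      rw [List.foldl_cons]
      show l.foldl sstep (some (some v)) = _
      exact foldl_sstep_some v l
    rw [hfold]
    by_cases hall : l.all (fun w => w == v)
    · have hall' : ∀ w ∈ l, w = v := by
        intro w hw; exact beq_iff_eq.mp (List.all_eq_true.1 hall w hw)
      rw [update_singleton_all_eq v l hall']
      simp [hall, PySem.Set.len, List.headI]
    · -- some element of l differs from v: the set has ≥ 2 distinct elements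
      have ⟨w, hw, hwv⟩ : ∃ w ∈ l, w ≠ v := by
        by_contra hno
        push_neg at hno
        exact hall (List.all_eq_true.2 (fun w hw => beq_iff_eq.mpr (hno w hw)))
      have hvmem : v ∈ PySem.Set.update [v] l := mem_update_left (by simp)
      have hwmem : w ∈ PySem.Set.update [v] l := mem_update_right hw
      have hlen1 : (PySem.Set.update [v] l).length ≠ 1 := by
        intro h1
        obtain ⟨x, hx⟩ := List.length_eq_one_iff.1 h1
        rw [hx] at hvmem hwmem
        simp at hvmem hwmem
        exact hwv (hwmem.trans hvmem.symm)
      simp only [hall, Bool.false_eq_true, if_false]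
      simp [PySem.Set.len]
      exact fun h1 => absurd h1 hlen1

-- ===== VERDICT (by name: the statement is the Claim_ definition above) =====
theorem get_constant_values_spec : Claim_equal_get_constant_values := by
  intro records _
  show get_constant_values records = get_constant_values_alt records
  unfold get_constant_values get_constant_values_alt
  show (List.foldl _ PySem.Dict.empty ("date" :: ALL_DIMENSIONS.drop 1)).items = _
  rw [List.foldl_cons]
  simp only [beq_self_eq_true, if_true]
  refine congrArg PySem.Dict.items ?_
  refine PySem.List.foldl_congr_mem _ _ _ _ ?_
  intro acc col hcol
  have hne : (col == "date") = false := by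
    have : col ≠ "date" := by
      intro h; subst h
      have : ("date" : String) ∉ ALL_DIMENSIONS.drop 1 := by decide
      exact this hcol
    simpa using this
  simp only [hne, Bool.false_eq_true, if_false]
  exact emit_eq records col hcol acc
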